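-- pv_equiv track=rewrite | github.com/christianrosdahl/aoc2024 | day05.py | page_in_right_order
-- ===== SOURCE A (Python) =====
-- def page_in_right_order(index, page, sequence, rules):
--     for index2, page2 in enumerate(sequence):
--         if index2 < index:
--             if not correct_order(page2, page, rules):
--                 return False
--         elif index2 > index:
--             if not correct_order(page, page2, rules):
--                 return False
--     return True
--
-- def correct_order(page1, page2, rules):
--     if (page2, page1) in rules:
--         return False
--     return True
-- ===== SOURCE B (Python) =====
-- def page_in_right_order(index, page, sequence, rules):
--     # Partition the sequence into the pages before and after `index`,
--     # then make one pass over the RULES (not the sequence).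
--     before = {p for i, p in enumerate(sequence) if i < index}
--     after = {p for i, p in enumerate(sequence) if i > index}
--     for a, b in rules:
--         if (a == page and b in before) or (b == page and a in after):
--             return False
--     return True
-- ===== Notes on version B (the rewrite author's own statement) =====
-- stated objective: alternative
-- what changed: B partitions the sequence into before/after sets once and then makes a single pass over the rules list, instead of A's interleaved loop over the sequence that does a full rules-membership scan per element.
import Mathlib
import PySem

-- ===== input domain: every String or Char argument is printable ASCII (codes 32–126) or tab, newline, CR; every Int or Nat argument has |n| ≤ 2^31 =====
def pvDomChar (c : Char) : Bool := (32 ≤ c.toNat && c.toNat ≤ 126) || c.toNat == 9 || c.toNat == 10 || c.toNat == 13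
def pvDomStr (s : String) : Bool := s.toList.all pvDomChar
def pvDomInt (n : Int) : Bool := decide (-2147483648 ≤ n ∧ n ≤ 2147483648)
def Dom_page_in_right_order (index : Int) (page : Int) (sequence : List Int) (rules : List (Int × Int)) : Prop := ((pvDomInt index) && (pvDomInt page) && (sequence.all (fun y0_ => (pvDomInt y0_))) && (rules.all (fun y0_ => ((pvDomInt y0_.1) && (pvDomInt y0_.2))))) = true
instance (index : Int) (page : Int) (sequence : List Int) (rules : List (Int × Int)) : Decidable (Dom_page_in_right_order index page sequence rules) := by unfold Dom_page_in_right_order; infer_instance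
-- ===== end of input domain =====

-- ===== PORT A =====
-- A: loop over enumerate(sequence), early-return False on a violated rule.
def correct_order (page1 : Int) (page2 : Int) (rules : List (Int × Int)) : Bool :=
  if (page2, page1) ∈ rules then false else true

def piroA_loop (index : Int) (page : Int) (rules : List (Int × Int)) :
    List (Int × Int) → Bool
  | [] => true
  | (index2, page2) :: rest =>
    if index2 < index then
      if ¬ correct_order page2 page rules then false
      else piroA_loop index page rules rest
    else if index2 > index then
      if ¬ correct_order page page2 rules then false
      else piroA_loop index page rules rest
    else piroA_loop index page rules rest

def page_in_right_order (index : Int) (page : Int) (sequence : List Int) (rules : List (Int × Int)) : Bool :=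
  piroA_loop index page rules (PySem.List.enumerate sequence)

-- ===== PORT B =====
-- B: partition the sequence into before/after sets once, then one pass over rules.
def piroB_loop (page : Int) (before : PySem.Set Int) (after : PySem.Set Int) :
    List (Int × Int) → Bool
  | [] => true
  | (a, b) :: rest =>
    if (a == page && PySem.Set.contains before b) || (b == page && PySem.Set.contains after a) then
      false
    else piroB_loop page before after rest

def page_in_right_order_alt (index : Int) (page : Int) (sequence : List Int) (rules : List (Int × Int)) : Bool :=
  let before := PySem.Set.ofList
    (((PySem.List.enumerate sequence).filter (fun ip => ip.1 < index)).map (fun ip => ip.2))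
  let after := PySem.Set.ofList
    (((PySem.List.enumerate sequence).filter (fun ip => ip.1 > index)).map (fun ip => ip.2))
  piroB_loop page before after rules

-- ===== PRECONDITION & SPEC =====
def Spec_page_in_right_order (index : Int) (page : Int) (sequence : List Int) (rules : List (Int × Int)) (out : Bool) : Prop := out = page_in_right_order_alt index page sequence rules
instance (index : Int) (page : Int) (sequence : List Int) (rules : List (Int × Int)) (out : Bool) : Decidable (Spec_page_in_right_order index page sequence rules out) := by unfold Spec_page_in_right_order; infer_instance

-- ===== CLAIM (what is proved, stated in full; the proofs are below) =====
def Claim_equal_page_in_right_order : Prop := ∀ (index : Int) (page : Int) (sequence : List Int) (rules : List (Int × Int)), Dom_page_in_right_order index page sequence rules → Spec_page_in_right_order index page sequence rules (page_in_right_order index page sequence rules)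

-- ===== LEMMAS AND PROOFS =====
theorem correct_order_eq_true_iff (p1 p2 : Int) (rules : List (Int × Int)) :
    correct_order p1 p2 rules = true ↔ (p2, p1) ∉ rules := by
  unfold correct_order
  split_ifs with h <;> simp [h]

theorem piroA_loop_eq_all (index page : Int) (rules : List (Int × Int)) (l : List (Int × Int)) :
    piroA_loop index page rules l =
      l.all (fun ip =>
        if ip.1 < index then correct_order ip.2 page rules
        else if ip.1 > index then correct_order page ip.2 rules
        else true) := by
  induction l with
  | nil => rfl
  | cons hd tl ih =>
    obtain ⟨i2, p2⟩ := hd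
    simp only [piroA_loop, List.all_cons, ih]
    by_cases h1 : i2 < index
    · cases hc : correct_order p2 page rules <;> simp [h1]
    · by_cases h2 : i2 > index
      · cases hc : correct_order page p2 rules <;> simp [h1, h2]
      · simp [h1, h2]

theorem piroB_loop_eq_all (page : Int) (before after : PySem.Set Int) (rs : List (Int × Int)) :
    piroB_loop page before after rs =
      rs.all (fun ab =>
        !((ab.1 == page && PySem.Set.contains before ab.2) ||
          (ab.2 == page && PySem.Set.contains after ab.1))) := by
  induction rs with
  | nil => rfl
  | cons hd tl ih =>
    obtain ⟨a, b⟩ := hd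
    simp only [piroB_loop, List.all_cons, ih]
    cases hc : ((a == page && PySem.Set.contains before b) ||
        (b == page && PySem.Set.contains after a))
    · rw [if_neg (by simp)]
      simp
    · rw [if_pos (by simp)]
      simp

theorem A_char (index page : Int) (sequence : List Int) (rules : List (Int × Int)) :
    page_in_right_order index page sequence rules = true ↔
      ∀ (k : Nat) (hk : k < sequence.length),
        ((k : Int) < index → (page, sequence[k]) ∉ rules) ∧
        (index < (k : Int) → (sequence[k], page) ∉ rules) := by
  unfold page_in_right_order
  rw [piroA_loop_eq_all, List.all_eq_true]
  constructor
  · intro h k hk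
    have hm : ((k : Int), sequence[k]) ∈ PySem.List.enumerate sequence :=
      (PySem.List.mem_enumerate_iff _ _ _).mpr ⟨k, hk, by simp⟩
    have hval := h _ hm
    constructor
    · intro hlt
      rw [if_pos (by simpa using hlt), correct_order_eq_true_iff] at hval
      exact hval
    · intro hgt
      rw [if_neg (by simp; omega), if_pos (by simpa using hgt),
        correct_order_eq_true_iff] at hval
      exact hval
  · intro h ip hmem
    obtain ⟨k, hk, rfl⟩ := (PySem.List.mem_enumerate_iff _ _ _).mp hmem
    split_ifs with h1 h2
    · rw [correct_order_eq_true_iff]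
      exact (h k hk).1 (by simpa using h1)
    · rw [correct_order_eq_true_iff]
      exact (h k hk).2 (by simpa using h2)
    · rfl

theorem mem_part (c : Int → Bool) (sequence : List Int) (p : Int) :
    p ∈ PySem.Set.ofList
        (((PySem.List.enumerate sequence).filter (fun ip => c ip.1)).map (fun ip => ip.2)) ↔
      ∃ (k : Nat) (hk : k < sequence.length), c (k : Int) = true ∧ sequence[k] = p := by
  rw [PySem.Set.mem_ofList]
  simp only [List.mem_map, List.mem_filter, PySem.List.mem_enumerate_iff]
  constructor
  · rintro ⟨⟨i, q⟩, ⟨⟨k, hk, heq⟩, hc⟩, rfl⟩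
    rw [Prod.ext_iff] at heq
    obtain ⟨h1, h2⟩ := heq
    subst h1; subst h2
    exact ⟨k, hk, by simpa using hc, rfl⟩
  · rintro ⟨k, hk, hc, rfl⟩
    exact ⟨((k : Int), sequence[k]), ⟨⟨k, hk, by simp⟩, by simpa using hc⟩, rfl⟩

theorem B_char (index page : Int) (sequence : List Int) (rules : List (Int × Int)) :
    page_in_right_order_alt index page sequence rules = true ↔
      ∀ r ∈ rules,
        ¬(r.1 = page ∧ ∃ (k : Nat) (hk : k < sequence.length), (k : Int) < index ∧ sequence[k] = r.2) ∧
        ¬(r.2 = page ∧ ∃ (k : Nat) (hk : k < sequence.length), index < (k : Int) ∧ sequence[k] = r.1) := by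
  unfold page_in_right_order_alt
  rw [piroB_loop_eq_all, List.all_eq_true]
  constructor
  · intro h r hr
    obtain ⟨a, b⟩ := r
    have hv := h (a, b) hr
    simp only [Bool.not_eq_eq_eq_not, Bool.not_true, Bool.or_eq_false_iff,
      Bool.and_eq_false_iff, beq_eq_false_iff_ne, ne_eq,
      PySem.Set.contains_eq_listContains, List.contains_eq_mem,
      decide_eq_false_iff_not] at hv
    obtain ⟨hv1, hv2⟩ := hv
    constructor
    · rintro ⟨rfl, hmem⟩
      have hmem' := (mem_part (fun i => decide (i < index)) sequence b).mpr
        (by obtain ⟨k, hk, hki, hsk⟩ := hmem; exact ⟨k, hk, by simpa using hki, hsk⟩)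
      rcases hv1 with h' | h'
      · exact h' rfl
      · exact (by simpa using h' : b ∉ _) hmem'
    · rintro ⟨rfl, hmem⟩
      have hmem' := (mem_part (fun i => decide (i > index)) sequence a).mpr
        (by obtain ⟨k, hk, hki, hsk⟩ := hmem; exact ⟨k, hk, by simpa using hki, hsk⟩)
      rcases hv2 with h' | h'
      · exact h' rfl
      · exact (by simpa using h' : a ∉ _) hmem'
  · intro h r hr
    obtain ⟨a, b⟩ := r
    have ⟨h1, h2⟩ := h (a, b) hr
    simp only [Bool.not_eq_eq_eq_not, Bool.not_true, Bool.or_eq_false_iff,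
      Bool.and_eq_false_iff, beq_eq_false_iff_ne, ne_eq,
      PySem.Set.contains_eq_listContains, List.contains_eq_mem,
      decide_eq_false_iff_not]
    constructor
    · by_cases ha : a = page
      · right
        intro hmem
        obtain ⟨k, hk, hki, hsk⟩ := (mem_part (fun i => decide (i < index)) sequence b).mp hmem
        exact h1 ⟨ha, k, hk, by simpa using hki, hsk⟩
      · exact Or.inl ha
    · by_cases hb : b = page
      · right
        intro hmem
        obtain ⟨k, hk, hki, hsk⟩ := (mem_part (fun i => decide (i > index)) sequence a).mp hmem
        exact h2 ⟨hb, k, hk, by simpa using hki, hsk⟩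
      · exact Or.inl hb

theorem piro_main (index page : Int) (sequence : List Int) (rules : List (Int × Int)) :
    page_in_right_order index page sequence rules =
      page_in_right_order_alt index page sequence rules := by
  rw [Bool.eq_iff_iff, A_char, B_char]
  constructor
  · intro hA r hr
    obtain ⟨a, b⟩ := r
    constructor
    · rintro ⟨rfl, k, hk, hki, hsk⟩
      exact ((hA k hk).1 hki) (hsk ▸ hr)
    · rintro ⟨rfl, k, hk, hki, hsk⟩
      exact ((hA k hk).2 hki) (hsk ▸ hr)
  · intro hB k hk
    constructor
    · intro hki hmem
      exact ((hB (page, sequence[k]) hmem).1) ⟨rfl, k, hk, hki, rfl⟩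
    · intro hki hmem
      exact ((hB (sequence[k], page) hmem).2) ⟨rfl, k, hk, hki, rfl⟩

-- ===== VERDICT (by name: the statement is the Claim_ definition above) =====
theorem page_in_right_order_spec : Claim_equal_page_in_right_order := by
  intro index page sequence rules _
  unfold Spec_page_in_right_order
  exact piro_main index page sequence rules
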